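-- pv_equiv track=rewrite | github.com/jasonmayday/LeetCode | leetcode_algorithm/1_easy/2363_合并相似的物品.py | mergeSimilarItems
-- ===== SOURCE A (Python) =====
-- from typing import List
--
-- def mergeSimilarItems(items1: List[List[int]], items2: List[List[int]]) -> List[List[int]]:
--     dic = {}
--     for i in items1:
--         dic[i[0]] = i[1]
--     for i in items2:
--         if i[0] in dic:
--             dic[i[0]] += i[1]
--         else:
--             dic[i[0]] = i[1]
--     # 字典变列表
--     res = []
--     for k, v in dic.items():
--         res.append([k, v])
--     res.sort()
--     return res
-- ===== SOURCE B (Python) =====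
-- def mergeSimilarItems(items1, items2):
--     # map for items1: plain assignment, last value per key wins
--     m1 = {i[0]: i[1] for i in items1}
--     # map for items2: sum values per key
--     m2 = {}
--     for i in items2:
--         m2[i[0]] = m2.get(i[0], 0) + i[1]
--     ks1 = sorted(m1)
--     ks2 = sorted(m2)
--     # two-pointer merge of the two sorted key lists
--     res = []
--     p, q = 0, 0
--     while p < len(ks1) and q < len(ks2):
--         x, y = ks1[p], ks2[q]
--         if x < y:
--             res.append([x, m1[x]])
--             p += 1
--         elif y < x:
--             res.append([y, m2[y]])
--             q += 1
--         else:
--             res.append([x, m1[x] + m2[y]])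
--             p += 1
--             q += 1
--     while p < len(ks1):
--         res.append([ks1[p], m1[ks1[p]]])
--         p += 1
--     while q < len(ks2):
--         res.append([ks2[q], m2[ks2[q]]])
--         q += 1
--     return res
-- ===== Notes on version B (the rewrite author's own statement) =====
-- stated objective: alternative
-- what changed: Instead of aggregating both inputs into one dict and sorting the resulting pair list, B builds a last-wins map for items1 and a summing map for items2, sorts their key lists, and emits the result directly in increasing key order by a two-pointer merge of the two sorted key lists.
import Mathlib
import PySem

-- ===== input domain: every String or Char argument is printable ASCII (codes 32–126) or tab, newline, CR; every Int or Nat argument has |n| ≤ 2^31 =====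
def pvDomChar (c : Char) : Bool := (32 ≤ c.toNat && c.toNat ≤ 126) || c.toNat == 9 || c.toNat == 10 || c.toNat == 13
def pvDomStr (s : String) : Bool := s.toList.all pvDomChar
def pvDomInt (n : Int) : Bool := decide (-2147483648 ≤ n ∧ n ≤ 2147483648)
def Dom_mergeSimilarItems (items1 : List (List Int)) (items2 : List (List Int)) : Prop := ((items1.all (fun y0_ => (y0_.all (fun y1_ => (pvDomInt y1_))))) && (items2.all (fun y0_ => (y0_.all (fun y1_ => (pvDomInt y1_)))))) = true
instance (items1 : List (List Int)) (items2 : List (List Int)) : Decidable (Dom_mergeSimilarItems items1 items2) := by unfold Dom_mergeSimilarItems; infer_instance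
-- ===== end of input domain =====

-- B replaces A's "aggregate everything into one dict, then sort" by two per-input maps
-- (items1: last value per key; items2: summed per key) whose sorted key lists are merged
-- by a two-pointer scan that emits the result already in increasing key order (objective: alternative).

-- ===== PORT A =====
def mergeSimilarItems (items1 : List (List Int)) (items2 : List (List Int)) : List (List Int) :=
  let dic := items1.foldl (fun d i =>
    d.insert (PySem.List.pyGetD i 0 0) (PySem.List.pyGetD i 1 0)) PySem.Dict.empty
  let dic := items2.foldl (fun d i =>
    if d.contains (PySem.List.pyGetD i 0 0) then
      d.modify (PySem.List.pyGetD i 0 0) 0 (fun v => v + PySem.List.pyGetD i 1 0)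
    else
      d.insert (PySem.List.pyGetD i 0 0) (PySem.List.pyGetD i 1 0)) dic
  let res := dic.items.foldl (fun r p => r ++ [[p.1, p.2]]) []
  PySem.List.sorted res (fun x => x) false

-- ===== PORT B =====
-- two-pointer merge of the two sorted key lists (the three while-loops of Source B)
def pvMergeScan (ks1 ks2 : List Int) (m1 m2 : PySem.Dict Int Int) : List (List Int) :=
  match ks1, ks2 with
  | [], [] => []
  | x :: xs, [] => [x, m1.getD x 0] :: pvMergeScan xs [] m1 m2
  | [], y :: ys => [y, m2.getD y 0] :: pvMergeScan [] ys m1 m2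
  | x :: xs, y :: ys =>
    if x < y then [x, m1.getD x 0] :: pvMergeScan xs (y :: ys) m1 m2
    else if y < x then [y, m2.getD y 0] :: pvMergeScan (x :: xs) ys m1 m2
    else [x, m1.getD x 0 + m2.getD y 0] :: pvMergeScan xs ys m1 m2
termination_by ks1.length + ks2.length

def mergeSimilarItems_alt (items1 : List (List Int)) (items2 : List (List Int)) : List (List Int) :=
  let m1 := items1.foldl (fun d i =>
    d.insert (PySem.List.pyGetD i 0 0) (PySem.List.pyGetD i 1 0)) PySem.Dict.empty
  let m2 := items2.foldl (fun d i =>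
    d.insert (PySem.List.pyGetD i 0 0)
      (d.getD (PySem.List.pyGetD i 0 0) 0 + PySem.List.pyGetD i 1 0)) PySem.Dict.empty
  pvMergeScan (PySem.List.sorted m1.keys (fun x => x) false)
    (PySem.List.sorted m2.keys (fun x => x) false) m1 m2

-- ===== PRECONDITION & SPEC =====
-- Pre_ excludes exactly the inputs where Python raises IndexError: an inner list with
-- fewer than two elements makes i[0] or i[1] raise in A (and in B alike).
def Pre_mergeSimilarItems (items1 : List (List Int)) (items2 : List (List Int)) : Prop :=
  (∀ i ∈ items1, 2 ≤ i.length) ∧ (∀ i ∈ items2, 2 ≤ i.length)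
instance (items1 : List (List Int)) (items2 : List (List Int)) : Decidable (Pre_mergeSimilarItems items1 items2) := by unfold Pre_mergeSimilarItems; infer_instance

def pvWitness_mergeSimilarItems : List (List Int) × List (List Int) := ([[1, 2], [3, 1]], [[1, 3], [2, 4]])

def Spec_mergeSimilarItems (items1 : List (List Int)) (items2 : List (List Int)) (out : List (List Int)) : Prop := out = mergeSimilarItems_alt items1 items2
instance (items1 : List (List Int)) (items2 : List (List Int)) (out : List (List Int)) : Decidable (Spec_mergeSimilarItems items1 items2 out) := by unfold Spec_mergeSimilarItems; infer_instance

-- ===== CLAIM (what is proved, stated in full; the proofs are below) =====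
def Claim_equal_mergeSimilarItems : Prop := ∀ (items1 : List (List Int)) (items2 : List (List Int)), Dom_mergeSimilarItems items1 items2 → Pre_mergeSimilarItems items1 items2 → Spec_mergeSimilarItems items1 items2 (mergeSimilarItems items1 items2)

-- ===== LEMMAS AND PROOFS =====

lemma pv_cons_lt (k k' v v' : Int) (h : k < k') : ([k, v] : List Int) < [k', v'] := by
  constructor; exact h

lemma pv_pairwise_lt_of_le_nodup (l : List Int) (h1 : l.Pairwise (· ≤ ·)) (h2 : l.Nodup) :
    l.Pairwise (· < ·) := by
  have := h1.and h2
  exact this.imp (fun ⟨a, b⟩ => lt_of_le_of_ne a b)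

def pvKeyMerge : List Int → List Int → List Int
  | [], ys => ys
  | x :: xs, [] => x :: pvKeyMerge xs []
  | x :: xs, y :: ys =>
    if x < y then x :: pvKeyMerge xs (y :: ys)
    else if y < x then y :: pvKeyMerge (x :: xs) ys
    else x :: pvKeyMerge xs ys
termination_by xs ys => xs.length + ys.length

lemma pv_mem_keyMerge (xs ys : List Int) (k : Int) :
    k ∈ pvKeyMerge xs ys ↔ k ∈ xs ∨ k ∈ ys := by
  fun_induction pvKeyMerge xs ys with
  | case1 ys => simp
  | case2 x xs ih => simp [ih]
  | case3 x xs y ys hlt ih => simp [ih]; tauto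
  | case4 x xs y ys hlt hlt2 ih => simp [ih]; tauto
  | case5 x xs y ys hlt hlt2 ih =>
    have hxy : x = y := le_antisymm (not_lt.mp hlt2) (not_lt.mp hlt)
    subst hxy; simp [ih]; tauto

lemma pv_pairwise_keyMerge (xs ys : List Int)
    (hxs : xs.Pairwise (· < ·)) (hys : ys.Pairwise (· < ·)) :
    (pvKeyMerge xs ys).Pairwise (· < ·) := by
  fun_induction pvKeyMerge xs ys with
  | case1 ys => exact hys
  | case2 x xs ih =>
    rw [List.pairwise_cons] at hxs ⊢
    refine ⟨fun z hz => ?_, ih hxs.2 hys⟩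
    rw [pv_mem_keyMerge] at hz
    rcases hz with h | h
    · exact hxs.1 z h
    · simp at h
  | case3 x xs y ys hlt ih =>
    rw [List.pairwise_cons] at hxs ⊢
    refine ⟨fun z hz => ?_, ih hxs.2 hys⟩
    rw [pv_mem_keyMerge] at hz
    rcases hz with h | h
    · exact hxs.1 z h
    · rcases List.mem_cons.mp h with rfl | h
      · exact hlt
      · exact lt_trans hlt (List.rel_of_pairwise_cons hys h)
  | case4 x xs y ys hlt hlt2 ih =>
    rw [List.pairwise_cons] at hys ⊢
    refine ⟨fun z hz => ?_, ih hxs hys.2⟩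
    rw [pv_mem_keyMerge] at hz
    rcases hz with h | h
    · rcases List.mem_cons.mp h with rfl | h
      · exact hlt2
      · exact lt_trans hlt2 (List.rel_of_pairwise_cons hxs h)
    · exact hys.1 z h
  | case5 x xs y ys hlt hlt2 ih =>
    have hxy : x = y := le_antisymm (not_lt.mp hlt2) (not_lt.mp hlt)
    rw [List.pairwise_cons] at hxs hys ⊢
    refine ⟨fun z hz => ?_, ih hxs.2 hys.2⟩
    rw [pv_mem_keyMerge] at hz
    rcases hz with h | h
    · exact hxs.1 z h
    · exact hxy ▸ hys.1 z h

lemma pv_notc {m : PySem.Dict Int Int} {k : Int} (h : ¬ m.contains k = true) : m.getD k 0 = 0 :=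
  PySem.Dict.getD_of_not_contains _ _ (by simpa using h)

lemma pv_head_le {y : Int} {ys : List Int} (h : (y :: ys).Pairwise (· < ·)) :
    ∀ z ∈ y :: ys, y ≤ z := by
  intro z hz
  rcases List.mem_cons.mp hz with rfl | hz
  · exact le_refl z
  · exact le_of_lt (List.rel_of_pairwise_cons h hz)

lemma pv_scan_eq (xs ys : List Int) (m1 m2 : PySem.Dict Int Int)
    (hxs : xs.Pairwise (· < ·)) (hys : ys.Pairwise (· < ·))
    (hx2 : ∀ k ∈ xs, m2.contains k = true → k ∈ ys)
    (hy1 : ∀ k ∈ ys, m1.contains k = true → k ∈ xs) :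
    pvMergeScan xs ys m1 m2
      = (pvKeyMerge xs ys).map (fun k => [k, m1.getD k 0 + m2.getD k 0]) := by
  fun_induction pvMergeScan xs ys m1 m2 with
  | case1 => simp only [pvKeyMerge, List.map_nil]
  | case2 x xs ih =>
    have h2 : m2.getD x 0 = 0 := pv_notc (fun hc => by simpa using hx2 x (by simp) hc)
    have ih' := ih (List.pairwise_cons.mp hxs).2 (by simp)
      (fun k hk hc => by simpa using hx2 k (List.mem_cons_of_mem _ hk) hc) (by simp)
    simp only [pvKeyMerge, List.map_cons, ih', h2, add_zero]
  | case3 y ys ih =>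
    have h1 : m1.getD y 0 = 0 := pv_notc (fun hc => by simpa using hy1 y (by simp) hc)
    have ih' := ih (by simp) (List.pairwise_cons.mp hys).2 (by simp)
      (fun k hk hc => by simpa using hy1 k (List.mem_cons_of_mem _ hk) hc)
    simp only [pvKeyMerge, List.map_cons, ih', h1, zero_add]
  | case4 x xs y ys hlt ih =>
    have hxny : x ∉ y :: ys := fun hm => absurd (pv_head_le hys x hm) (not_le.mpr hlt)
    have h2 : m2.getD x 0 = 0 := pv_notc (fun hc => hxny (hx2 x (by simp) hc))
    have ih' := ih (List.pairwise_cons.mp hxs).2 hys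
      (fun k hk hc => hx2 k (List.mem_cons_of_mem _ hk) hc)
      (fun k hk hc => by
        rcases List.mem_cons.mp (hy1 k hk hc) with rfl | h
        · exact absurd (pv_head_le hys k hk) (not_le.mpr hlt)
        · exact h)
    simp only [pvKeyMerge, if_pos hlt, List.map_cons, ih', h2, add_zero]
  | case5 x xs y ys hlt hlt2 ih =>
    have hynx : y ∉ x :: xs := fun hm => absurd (pv_head_le hxs y hm) (not_le.mpr hlt2)
    have h1 : m1.getD y 0 = 0 := pv_notc (fun hc => hynx (hy1 y (by simp) hc))
    have ih' := ih hxs (List.pairwise_cons.mp hys).2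
      (fun k hk hc => by
        rcases List.mem_cons.mp (hx2 k hk hc) with rfl | h
        · exact absurd (pv_head_le hxs k hk) (not_le.mpr hlt2)
        · exact h)
      (fun k hk hc => hy1 k (List.mem_cons_of_mem _ hk) hc)
    simp only [pvKeyMerge, if_neg hlt, if_pos hlt2, List.map_cons, ih', h1, zero_add]
  | case6 x xs y ys hlt hlt2 ih =>
    have hxy : x = y := le_antisymm (not_lt.mp hlt2) (not_lt.mp hlt)
    subst hxy
    have ih' := ih (List.pairwise_cons.mp hxs).2 (List.pairwise_cons.mp hys).2
      (fun k hk hc => by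
        rcases List.mem_cons.mp (hx2 k (List.mem_cons_of_mem _ hk) hc) with rfl | h
        · exact absurd (List.rel_of_pairwise_cons hxs hk) (lt_irrefl k)
        · exact h)
      (fun k hk hc => by
        rcases List.mem_cons.mp (hy1 k (List.mem_cons_of_mem _ hk) hc) with rfl | h
        · exact absurd (List.rel_of_pairwise_cons hys hk) (lt_irrefl k)
        · exact h)
    simp only [pvKeyMerge, if_neg hlt, List.map_cons, ih']

lemma pv_loopA_getD (l : List (List Int)) (d : PySem.Dict Int Int) (k : Int) :
    (l.foldl (fun d i =>
      if d.contains (PySem.List.pyGetD i 0 0) then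
        d.modify (PySem.List.pyGetD i 0 0) 0 (fun v => v + PySem.List.pyGetD i 1 0)
      else d.insert (PySem.List.pyGetD i 0 0) (PySem.List.pyGetD i 1 0)) d).getD k 0
      = d.getD k 0 + ((l.filter (fun i => PySem.List.pyGetD i 0 0 == k)).map
          (fun i => PySem.List.pyGetD i 1 0)).sum := by
  induction l generalizing d with
  | nil => simp
  | cons i l ih =>
    rw [List.foldl_cons, ih]
    have hstep : ∀ d' : PySem.Dict Int Int,
        ((if d'.contains (PySem.List.pyGetD i 0 0) then
          d'.modify (PySem.List.pyGetD i 0 0) 0 (fun v => v + PySem.List.pyGetD i 1 0)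
        else d'.insert (PySem.List.pyGetD i 0 0) (PySem.List.pyGetD i 1 0))).getD k 0
        = if PySem.List.pyGetD i 0 0 == k then d'.getD k 0 + PySem.List.pyGetD i 1 0
          else d'.getD k 0 := by
      intro d'
      by_cases hc : d'.contains (PySem.List.pyGetD i 0 0) = true
      · rw [if_pos hc, PySem.Dict.getD_modify]
        by_cases hk : PySem.List.pyGetD i 0 0 = k
        · simp [hk]
        · simp [hk, Ne.symm hk]
      · rw [if_neg hc, PySem.Dict.getD_insert]
        by_cases hk : PySem.List.pyGetD i 0 0 = k
        · subst hk
          simp [PySem.Dict.getD_of_not_contains _ _ (by simpa using hc)]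
        · simp [hk, Ne.symm hk]
    rw [hstep]
    by_cases hk : PySem.List.pyGetD i 0 0 = k <;> simp [hk]; ring
lemma pv_loopA_contains (l : List (List Int)) (d : PySem.Dict Int Int) (k : Int) :
    (l.foldl (fun d i =>
      if d.contains (PySem.List.pyGetD i 0 0) then
        d.modify (PySem.List.pyGetD i 0 0) 0 (fun v => v + PySem.List.pyGetD i 1 0)
      else d.insert (PySem.List.pyGetD i 0 0) (PySem.List.pyGetD i 1 0)) d).contains k
      = (d.contains k || l.any (fun i => PySem.List.pyGetD i 0 0 == k)) := by
  induction l generalizing d with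
  | nil => simp
  | cons i l ih =>
    rw [List.foldl_cons, ih]
    have hstep : ((if d.contains (PySem.List.pyGetD i 0 0) then
          d.modify (PySem.List.pyGetD i 0 0) 0 (fun v => v + PySem.List.pyGetD i 1 0)
        else d.insert (PySem.List.pyGetD i 0 0) (PySem.List.pyGetD i 1 0))).contains k
        = (d.contains k || (PySem.List.pyGetD i 0 0 == k)) := by
      by_cases hc : d.contains (PySem.List.pyGetD i 0 0) = true
      · rw [if_pos hc, PySem.Dict.contains_modify]
        simp [BEq.comm, Bool.or_comm]
      · rw [if_neg hc, PySem.Dict.contains_insert]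
        simp [BEq.comm, Bool.or_comm]
    rw [hstep]
    simp [Bool.or_assoc]
lemma pv_loopA_nodup (l : List (List Int)) (d : PySem.Dict Int Int) (h : d.keys.Nodup) :
    (l.foldl (fun d i =>
      if d.contains (PySem.List.pyGetD i 0 0) then
        d.modify (PySem.List.pyGetD i 0 0) 0 (fun v => v + PySem.List.pyGetD i 1 0)
      else d.insert (PySem.List.pyGetD i 0 0) (PySem.List.pyGetD i 1 0)) d).keys.Nodup := by
  induction l generalizing d with
  | nil => exact h
  | cons i l ih =>
    rw [List.foldl_cons]
    apply ih
    by_cases hc : d.contains (PySem.List.pyGetD i 0 0) = true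
    · rw [if_pos hc, PySem.Dict.keys_modify,
        PySem.Dict.keys_insert_of_contains _ _ hc]
      exact h
    · rw [if_neg hc, PySem.Dict.keys_insert_of_not_contains _ _ (by simpa using hc)]
      simp only [List.nodup_append, List.nodup_cons]
      refine ⟨h, by simp, ?_⟩
      intro a ha b hb
      simp only [List.mem_singleton] at hb
      subst hb
      intro hab
      exact absurd (show PySem.List.pyGetD i 0 0 ∈ d.keys by rwa [hab] at ha)
        (by simpa [PySem.Dict.contains_iff_mem_keys] using hc)

lemma pv_loopB2_getD (l : List (List Int)) (d : PySem.Dict Int Int) (k : Int) :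
    (l.foldl (fun d i =>
      d.insert (PySem.List.pyGetD i 0 0)
        (d.getD (PySem.List.pyGetD i 0 0) 0 + PySem.List.pyGetD i 1 0)) d).getD k 0
      = d.getD k 0 + ((l.filter (fun i => PySem.List.pyGetD i 0 0 == k)).map
          (fun i => PySem.List.pyGetD i 1 0)).sum := by
  induction l generalizing d with
  | nil => simp
  | cons i l ih =>
    rw [List.foldl_cons, ih, PySem.Dict.getD_insert]
    by_cases hk : PySem.List.pyGetD i 0 0 = k
    · simp [hk] ; ring
    · simp [hk, Ne.symm hk]

lemma pv_loopB2_contains (l : List (List Int)) (d : PySem.Dict Int Int) (k : Int) :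
    (l.foldl (fun d i =>
      d.insert (PySem.List.pyGetD i 0 0)
        (d.getD (PySem.List.pyGetD i 0 0) 0 + PySem.List.pyGetD i 1 0)) d).contains k
      = (d.contains k || l.any (fun i => PySem.List.pyGetD i 0 0 == k)) := by
  induction l generalizing d with
  | nil => simp
  | cons i l ih =>
    rw [List.foldl_cons, ih, PySem.Dict.contains_insert]
    simp only [List.any_cons]
    cases hd : d.contains k <;> cases hck : (k == PySem.List.pyGetD i 0 0) <;>
      simp_all [BEq.comm]

-- ===== VERDICT (by name: the statement is the Claim_ definition above) =====
theorem mergeSimilarItems_spec : Claim_equal_mergeSimilarItems := by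
  intro items1 items2 _ _
  show mergeSimilarItems items1 items2 = mergeSimilarItems_alt items1 items2
  unfold mergeSimilarItems mergeSimilarItems_alt
  simp only []
  set D1 := items1.foldl (fun d i =>
    d.insert (PySem.List.pyGetD i 0 0) (PySem.List.pyGetD i 1 0)) PySem.Dict.empty with hD1def
  set d := items2.foldl (fun d i =>
    if d.contains (PySem.List.pyGetD i 0 0) then
      d.modify (PySem.List.pyGetD i 0 0) 0 (fun v => v + PySem.List.pyGetD i 1 0)
    else d.insert (PySem.List.pyGetD i 0 0) (PySem.List.pyGetD i 1 0)) D1 with hddef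
  set m2 := items2.foldl (fun d i =>
    d.insert (PySem.List.pyGetD i 0 0)
      (d.getD (PySem.List.pyGetD i 0 0) 0 + PySem.List.pyGetD i 1 0)) PySem.Dict.empty with hm2def
  set ks1 := PySem.List.sorted D1.keys (fun x => x) false with hks1def
  set ks2 := PySem.List.sorted m2.keys (fun x => x) false with hks2def
  have h1nd : D1.keys.Nodup := by
    rw [hD1def]
    exact PySem.Dict.nodup_keys_foldl_insert_key items1 (fun i => PySem.List.pyGetD i 0 0)
      (fun d i => PySem.List.pyGetD i 1 0) PySem.Dict.empty (by simp)
  have hm2nd : m2.keys.Nodup := by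
    rw [hm2def]
    exact PySem.Dict.nodup_keys_foldl_insert_key items2 (fun i => PySem.List.pyGetD i 0 0)
      (fun d i => d.getD (PySem.List.pyGetD i 0 0) 0 + PySem.List.pyGetD i 1 0) PySem.Dict.empty (by simp)
  have hdnd : d.keys.Nodup := by rw [hddef]; exact pv_loopA_nodup items2 D1 h1nd
  have hks1 : ks1.Pairwise (· < ·) := by
    refine pv_pairwise_lt_of_le_nodup _ (PySem.List.sorted_pairwise D1.keys (fun x => x)) ?_
    exact ((PySem.List.sorted_perm D1.keys (fun x => x) false).nodup_iff).mpr h1nd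
  have hks2 : ks2.Pairwise (· < ·) := by
    refine pv_pairwise_lt_of_le_nodup _ (PySem.List.sorted_pairwise m2.keys (fun x => x)) ?_
    exact ((PySem.List.sorted_perm m2.keys (fun x => x) false).nodup_iff).mpr hm2nd
  have hscan := pv_scan_eq ks1 ks2 D1 m2 hks1 hks2
    (fun k _ hc => (PySem.List.mem_sorted _ _ _ _).mpr ((PySem.Dict.contains_iff_mem_keys _ _).mp hc))
    (fun k _ hc => (PySem.List.mem_sorted _ _ _ _).mpr ((PySem.Dict.contains_iff_mem_keys _ _).mp hc))
  have hval : ∀ k, D1.getD k 0 + m2.getD k 0 = d.getD k 0 := by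
    intro k
    rw [hddef, hm2def, pv_loopA_getD, pv_loopB2_getD]
    simp
  have hKMpw : (pvKeyMerge ks1 ks2).Pairwise (· < ·) := pv_pairwise_keyMerge ks1 ks2 hks1 hks2
  have hKMnd : (pvKeyMerge ks1 ks2).Nodup := hKMpw.imp (fun h => ne_of_lt h)
  have hpermk : (pvKeyMerge ks1 ks2).Perm d.keys := by
    rw [List.perm_ext_iff_of_nodup hKMnd hdnd]
    intro k
    rw [pv_mem_keyMerge, hks1def, hks2def, PySem.List.mem_sorted, PySem.List.mem_sorted,
      ← PySem.Dict.contains_iff_mem_keys, ← PySem.Dict.contains_iff_mem_keys,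
      ← PySem.Dict.contains_iff_mem_keys, hddef, hm2def,
      pv_loopA_contains, pv_loopB2_contains]
    simp
  have hres : ((d.items.foldl (fun r p => r ++ [[p.1, p.2]]) []) : List (List Int))
      = d.keys.map (fun k => [k, d.getD k 0]) := by
    rw [PySem.List.foldl_append_singleton_eq_map (fun p : Int × Int => [p.1, p.2]) d.items []]
    rw [PySem.Dict.items_eq_map_keys d hdnd 0, List.map_map]
    simp
  rw [hscan, hres]
  rw [List.map_congr_left (fun k _ => by
    show [k, D1.getD k 0 + m2.getD k 0] = [k, d.getD k 0]
    rw [hval k] :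
    ∀ k ∈ pvKeyMerge ks1 ks2, (fun k => [k, D1.getD k 0 + m2.getD k 0]) k = (fun k => [k, d.getD k 0]) k)]
  show PySem.List.sorted (d.keys.map (fun k => [k, d.getD k 0])) (fun x => (x : List Int)) false
    = (pvKeyMerge ks1 ks2).map (fun k => [k, d.getD k 0])
  have hinst : (fun (a b : List Int) => a.decidableLT b : DecidableLT (List Int))
      = (LinearOrder.toDecidableLT : DecidableLT (List Int)) := by
    funext a b; exact Subsingleton.elim _ _
  rw [hinst]
  refine PySem.List.sorted_eq_of_perm_of_pairwise_lt (κ := List Int)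
    (d.keys.map (fun k => [k, d.getD k 0])) ((pvKeyMerge ks1 ks2).map (fun k => [k, d.getD k 0]))
    (fun x => x) (hpermk.map _) ?_
  rw [List.pairwise_map]
  exact hKMpw.imp (fun h => pv_cons_lt _ _ _ _ h)
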